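-- pv_equiv track=rewrite | github.com/alexisthomasgm/CostAdvisor | backend/app/services/costing_engine.py | generate_periods
-- ===== SOURCE A (Python) =====
-- MONTH_NAMES = [
--     "Jan", "Feb", "Mar", "Apr", "May", "Jun",
--     "Jul", "Aug", "Sep", "Oct", "Nov", "Dec",
-- ]
--
-- def generate_periods(
--     from_year: int, from_quarter: int,
--     to_year: int, to_quarter: int,
--     granularity: str = "quarterly",
-- ) -> list[tuple[int, int, int | None, str]]:
--     """
--     Generate period list as [(year, quarter, month_or_none, label), ...].
--     """
--     periods = []
--     y, q = from_year, from_quarter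
--     while (y, q) <= (to_year, to_quarter):
--         if granularity == "monthly":
--             for m_offset in range(3):
--                 month = (q - 1) * 3 + m_offset + 1
--                 label = f"{MONTH_NAMES[month - 1]}-{str(y)[-2:]}"
--                 periods.append((y, q, month, label))
--         else:
--             label = f"Q{q}-{str(y)[-2:]}"
--             periods.append((y, q, None, label))
--         q += 1
--         if q > 4:
--             q = 1
--             y += 1
--     return periods
-- ===== SOURCE B (Python) =====
-- MONTH_NAMES = [
--     "Jan", "Feb", "Mar", "Apr", "May", "Jun",
--     "Jul", "Aug", "Sep", "Oct", "Nov", "Dec",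
-- ]
--
-- def generate_periods(
--     from_year: int, from_quarter: int,
--     to_year: int, to_quarter: int,
--     granularity: str = "quarterly",
-- ) -> list[tuple[int, int, int | None, str]]:
--     """
--     Generate period list as [(year, quarter, month_or_none, label), ...].
--
--     Walks the four quarters of every year in the span and keeps those
--     between the two endpoints.
--     """
--     if (from_year, from_quarter) > (to_year, to_quarter):
--         return []
--     if not (1 <= from_quarter <= 4 and 1 <= to_quarter <= 4):
--         raise ValueError("quarters must be in 1..4")
--     periods = []
--     for y in range(from_year, to_year + 1):
--         yy = str(y)[-2:]
--         for q in range(1, 5):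
--             if (from_year, from_quarter) <= (y, q) <= (to_year, to_quarter):
--                 if granularity == "monthly":
--                     for m in range(3 * q - 2, 3 * q + 1):
--                         periods.append((y, q, m, f"{MONTH_NAMES[m - 1]}-{yy}"))
--                 else:
--                     periods.append((y, q, None, f"Q{q}-{yy}"))
--     return periods
-- ===== Notes on version B (the rewrite author's own statement) =====
-- stated objective: alternative
-- what changed: Replaces A's while loop with mutable (year, quarter) state and carry logic by an early empty-span return, quarter-argument validation, and a bounded nested loop over the years and the four quarters keeping the quarters between the two endpoints; Pre_ admits the natural quarter domain 1..4 plus every empty span (both return []), excluding out-of-range quarter arguments with a nonempty span, where A emits tuples with quarter numbers outside 1..4 (or raises IndexError for monthly) as artefacts of its carry loop, while B raises ValueError.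
-- outside the precondition, e.g. on generate_periods(0, 0, 0, 0, ''): A returns [(0, 0, None, 'Q0-0')], B raises ValueError; on generate_periods(0, 5, 1, 1, ''): A returns [(0, 5, None, 'Q5-0'), (1, 1, None, 'Q1-1')], B raises ValueError
import Mathlib
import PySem

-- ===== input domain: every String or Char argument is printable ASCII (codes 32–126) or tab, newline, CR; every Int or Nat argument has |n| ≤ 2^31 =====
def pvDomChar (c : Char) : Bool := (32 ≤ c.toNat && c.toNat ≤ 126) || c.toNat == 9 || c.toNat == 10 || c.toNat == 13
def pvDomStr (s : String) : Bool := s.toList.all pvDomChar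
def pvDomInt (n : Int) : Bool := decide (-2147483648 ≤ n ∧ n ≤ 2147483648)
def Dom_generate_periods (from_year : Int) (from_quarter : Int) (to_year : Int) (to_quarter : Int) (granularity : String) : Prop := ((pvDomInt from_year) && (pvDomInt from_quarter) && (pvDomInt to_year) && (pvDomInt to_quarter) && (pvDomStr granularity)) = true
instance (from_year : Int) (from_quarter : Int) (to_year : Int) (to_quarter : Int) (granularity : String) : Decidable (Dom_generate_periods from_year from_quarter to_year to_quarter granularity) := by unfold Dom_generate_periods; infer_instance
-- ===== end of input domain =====

-- B replaces A's while loop with carried (year, quarter) state by a bounded nested loop over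
-- years and the four quarters, filtered by the endpoint span (alternative decomposition, same cost).

-- ===== PORT A =====
-- MONTH_NAMES (module constant, shared by both Pythons)
def MONTH_NAMES : List String :=
  ["Jan", "Feb", "Mar", "Apr", "May", "Jun", "Jul", "Aug", "Sep", "Oct", "Nov", "Dec"]

-- str(y)[-2:] (appears verbatim in both Pythons)
def lastTwo (y : Int) : String :=
  PySem.Str.slice (PySem.Int.toStr y) (some (-2)) none

-- the while loop of A: state (y, q), Python tuple comparison (y, q) <= (to_year, to_quarter).
-- fuel is a totality guard only: generate_periods hands it enough for every iteration.
def genLoopA (Y Q : Int) (granularity : String) : Nat → Int → Int → List (Int × Int × Option Int × String)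
  | 0, _, _ => []
  | fuel + 1, y, q =>
    if y < Y ∨ (y = Y ∧ q ≤ Q) then
      (if granularity = "monthly" then
        (PySem.List.pyRange 0 3 1).map (fun m_offset =>
          let month := (q - 1) * 3 + m_offset + 1
          (y, q, some month,
            ((PySem.List.pyGet? MONTH_NAMES (month - 1)).getD "") ++ "-" ++ lastTwo y))
      else
        [(y, q, none, "Q" ++ PySem.Int.toStr q ++ "-" ++ lastTwo y)])
      ++ (if q + 1 > 4 then genLoopA Y Q granularity fuel (y + 1) 1
          else genLoopA Y Q granularity fuel y (q + 1))
    else []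

def generate_periods (from_year : Int) (from_quarter : Int) (to_year : Int) (to_quarter : Int) (granularity : String) : List (Int × Int × Option Int × String) :=
  genLoopA to_year to_quarter granularity
    (8 * (to_year + 1 - from_year) + max (6 - from_quarter) 0).toNat from_year from_quarter

-- ===== PORT B =====
def generate_periods_alt (from_year : Int) (from_quarter : Int) (to_year : Int) (to_quarter : Int) (granularity : String) : List (Int × Int × Option Int × String) :=
  -- (from_year, from_quarter) > (to_year, to_quarter): Python tuple comparison
  if to_year < from_year ∨ (to_year = from_year ∧ to_quarter < from_quarter) then []
  else if ¬ (1 ≤ from_quarter ∧ from_quarter ≤ 4 ∧ 1 ≤ to_quarter ∧ to_quarter ≤ 4) then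
    []  -- Source B raises ValueError here; unreachable inside Pre_ (no value is claimed)
  else
    (PySem.List.pyRange from_year (to_year + 1) 1).flatMap (fun y =>
      let yy := lastTwo y
      (PySem.List.pyRange 1 5 1).flatMap (fun q =>
        -- (from_year, from_quarter) <= (y, q) <= (to_year, to_quarter)
        if (from_year < y ∨ (from_year = y ∧ from_quarter ≤ q)) ∧
           (y < to_year ∨ (y = to_year ∧ q ≤ to_quarter)) then
          (if granularity = "monthly" then
            (PySem.List.pyRange (3 * q - 2) (3 * q + 1) 1).map (fun m =>
              (y, q, some m, ((PySem.List.pyGet? MONTH_NAMES (m - 1)).getD "") ++ "-" ++ yy))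
          else
            [(y, q, none, "Q" ++ PySem.Int.toStr q ++ "-" ++ yy)])
        else []))

-- ===== PRECONDITION & SPEC =====
-- Pre_ admits the natural quarter domain 1..4 and, besides, every empty range (end before
-- start lexicographically, where both programs return []); it excludes out-of-range quarter
-- arguments with a nonempty range, where A's carry loop emits tuples with quarter numbers
-- outside 1..4 (or raises IndexError for "monthly"), artefacts of its implementation rather
-- than meaningful periods.
def Pre_generate_periods (from_year : Int) (from_quarter : Int) (to_year : Int) (to_quarter : Int) (granularity : String) : Prop :=
  (1 ≤ from_quarter ∧ from_quarter ≤ 4 ∧ 1 ≤ to_quarter ∧ to_quarter ≤ 4) ∨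
  (to_year < from_year ∨ (to_year = from_year ∧ to_quarter < from_quarter))
instance (from_year : Int) (from_quarter : Int) (to_year : Int) (to_quarter : Int) (granularity : String) : Decidable (Pre_generate_periods from_year from_quarter to_year to_quarter granularity) := by unfold Pre_generate_periods; infer_instance

def pvWitness_generate_periods : Int × Int × Int × Int × String := (2020, 1, 2021, 3, "monthly")

def Spec_generate_periods (from_year : Int) (from_quarter : Int) (to_year : Int) (to_quarter : Int) (granularity : String) (out : List (Int × Int × Option Int × String)) : Prop := out = generate_periods_alt from_year from_quarter to_year to_quarter granularity
instance (from_year : Int) (from_quarter : Int) (to_year : Int) (to_quarter : Int) (granularity : String) (out : List (Int × Int × Option Int × String)) : Decidable (Spec_generate_periods from_year from_quarter to_year to_quarter granularity out) := by unfold Spec_generate_periods; infer_instance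

-- ===== CLAIM (what is proved, stated in full; the proofs are below) =====
def Claim_equal_generate_periods : Prop := ∀ (from_year : Int) (from_quarter : Int) (to_year : Int) (to_quarter : Int) (granularity : String), Dom_generate_periods from_year from_quarter to_year to_quarter granularity → Pre_generate_periods from_year from_quarter to_year to_quarter granularity → Spec_generate_periods from_year from_quarter to_year to_quarter granularity (generate_periods from_year from_quarter to_year to_quarter granularity)

-- ===== LEMMAS AND PROOFS =====

-- B's per-quarter body, named for the proofs below
def qbody (g : String) (y q : Int) : List (Int × Int × Option Int × String) :=
  if g = "monthly" then
    (PySem.List.pyRange (3 * q - 2) (3 * q + 1) 1).map (fun m =>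
      (y, q, some m, ((PySem.List.pyGet? MONTH_NAMES (m - 1)).getD "") ++ "-" ++ lastTwo y))
  else
    [(y, q, none, "Q" ++ PySem.Int.toStr q ++ "-" ++ lastTwo y)]

-- B's inner loop over the quarters lo..hi of year y
def innerQ (g : String) (y lo hi : Int) : List (Int × Int × Option Int × String) :=
  (PySem.List.pyRange lo (hi + 1) 1).flatMap (qbody g y)

-- what the loop still has to produce from state (y, q): the rest of year y, then full or
-- end-clipped years up to Y
def yearsFrom (Y Q : Int) (g : String) (y q : Int) : List (Int × Int × Option Int × String) :=
  innerQ g y q (if y = Y then Q else 4)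
    ++ (PySem.List.pyRange (y + 1) (Y + 1) 1).flatMap (fun y' =>
        innerQ g y' 1 (if y' = Y then Q else 4))

lemma pyRange3 (a : Int) : PySem.List.pyRange a (a + 3) 1 = [a, a + 1, a + 2] := by
  rw [PySem.List.pyRange_one_cons (by omega), PySem.List.pyRange_one_cons (by omega),
      PySem.List.pyRange_one_cons (by omega), PySem.List.pyRange_one_eq_nil (by omega)]
  simp only [List.cons.injEq, and_true, true_and]
  omega

-- the tuples A emits for one quarter (y, q) coincide with B's per-quarter body
lemma chunk_eq (y q : Int) (g : String) :
    (if g = "monthly" then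
      (PySem.List.pyRange 0 3 1).map (fun m_offset =>
        let month := (q - 1) * 3 + m_offset + 1
        (y, q, some month,
          ((PySem.List.pyGet? MONTH_NAMES (month - 1)).getD "") ++ "-" ++ lastTwo y))
    else
      [(y, q, none, "Q" ++ PySem.Int.toStr q ++ "-" ++ lastTwo y)]) = qbody g y q := by
  unfold qbody
  split_ifs with h
  · rw [show PySem.List.pyRange 0 3 1 = [0, 1, 2] from by decide,
        show (3 : Int) * q + 1 = (3 * q - 2) + 3 from by ring, pyRange3]
    simp only [List.map_cons, List.map_nil]
    rw [show (q - 1) * 3 + 0 + 1 = 3 * q - 2 from by ring,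
        show (q - 1) * 3 + 1 + 1 = 3 * q - 2 + 1 from by ring,
        show (q - 1) * 3 + 2 + 1 = 3 * q - 2 + 2 from by ring]
  · rfl

lemma loop_exit (Y Q : Int) (g : String) (fuel : Nat) (y q : Int)
    (h : ¬ (y < Y ∨ (y = Y ∧ q ≤ Q))) : genLoopA Y Q g fuel y q = [] := by
  cases fuel with
  | zero => rfl
  | succ n => rw [genLoopA, if_neg h]

-- A's loop on a live canonical state equals B's remaining year-wise production
lemma loop_eq_years (Y Q : Int) (g : String) (hQ1 : 1 ≤ Q) (hQ4 : Q ≤ 4) :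
    ∀ (fuel : Nat) (y q : Int), 1 ≤ q → q ≤ 4 →
      (8 * (Y + 1 - y) + max (6 - q) 0).toNat ≤ fuel →
      (y < Y ∨ (y = Y ∧ q ≤ Q)) →
      genLoopA Y Q g fuel y q = yearsFrom Y Q g y q := by
  intro fuel
  induction fuel with
  | zero =>
    intro y q hq1 hq4 hfuel hcond
    exfalso
    rcases hcond with h | h <;> omega
  | succ fuel ih =>
    intro y q hq1 hq4 hfuel hcond
    rw [genLoopA, if_pos hcond, chunk_eq y q g]
    by_cases hcarry : q + 1 > 4
    · have hq : q = 4 := by omega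
      subst hq
      by_cases hyY : y = Y
      · have hQeq : Q = 4 := by rcases hcond with h | h <;> omega
        rw [if_pos hcarry, loop_exit Y Q g fuel (y + 1) 1 (by omega)]
        unfold yearsFrom innerQ
        rw [if_pos hyY, hQeq,
            PySem.List.pyRange_one_eq_nil (by omega : Y + 1 ≤ y + 1),
            List.flatMap_nil, List.append_nil,
            PySem.List.pyRange_one_cons (by omega : (4 : Int) < 4 + 1),
            PySem.List.pyRange_one_eq_nil (by omega : (4 : Int) + 1 ≤ 4 + 1)]
        simp [List.flatMap_cons]
      · have hyY' : y < Y := by rcases hcond with h | h; exacts [h, absurd h.1 hyY]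
        rw [if_pos hcarry,
            ih (y + 1) 1 (by omega) (by omega) (by omega) (by omega)]
        unfold yearsFrom innerQ
        rw [if_neg hyY,
            PySem.List.pyRange_one_cons (by omega : (4 : Int) < 4 + 1),
            PySem.List.pyRange_one_eq_nil (by omega : (4 : Int) + 1 ≤ 4 + 1),
            PySem.List.pyRange_one_cons (by omega : y + 1 < Y + 1)]
        simp only [List.flatMap_cons, List.flatMap_nil, List.append_nil]
    · rw [if_neg hcarry]
      by_cases hnext : y < Y ∨ (y = Y ∧ q + 1 ≤ Q)
      · rw [ih y (q + 1) (by omega) (by omega) (by omega) hnext]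
        unfold yearsFrom innerQ
        have hlo : q < (if y = Y then Q else 4) + 1 := by
          rcases hcond with h | h
          · rw [if_neg (by omega)]; omega
          · rw [if_pos h.1]; omega
        rw [PySem.List.pyRange_one_cons hlo, List.flatMap_cons, List.append_assoc]
      · have h1 : y = Y := by
          rcases hcond with h | h
          · exact absurd (Or.inl h) hnext
          · exact h.1
        have h2 : q = Q := by
          rcases hcond with h | h
          · exact absurd (Or.inl h) hnext
          · omega
        subst h1; subst h2
        rw [loop_exit _ _ g fuel y (q + 1) hnext]
        unfold yearsFrom innerQ
        rw [if_pos rfl,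
            PySem.List.pyRange_one_cons (by omega : q < q + 1),
            PySem.List.pyRange_one_eq_nil (le_refl (q + 1)),
            PySem.List.pyRange_one_eq_nil (le_refl (y + 1))]
        simp [List.flatMap_cons]

-- a range flatMap with an interval filter is the flatMap over the clipped range
lemma flatMap_if_range {T : Type} (f : Int → List T) (lo hi : Int) :
    ∀ (n : Nat) (a b : Int), b - a ≤ (n : Int) →
      (PySem.List.pyRange a b 1).flatMap (fun q => if lo ≤ q ∧ q ≤ hi then f q else [])
        = (PySem.List.pyRange (max a lo) (min b (hi + 1)) 1).flatMap f := by
  intro n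
  induction n with
  | zero =>
    intro a b hn
    rw [PySem.List.pyRange_one_eq_nil (by omega),
        PySem.List.pyRange_one_eq_nil (by omega)]
    rfl
  | succ n ih =>
    intro a b hn
    by_cases hab : b ≤ a
    · rw [PySem.List.pyRange_one_eq_nil hab, PySem.List.pyRange_one_eq_nil (by omega)]
      rfl
    · rw [PySem.List.pyRange_one_cons (by omega), List.flatMap_cons, ih (a + 1) b (by omega)]
      by_cases h : lo ≤ a ∧ a ≤ hi
      · rw [if_pos h,
            show max a lo = a from by omega, show max (a + 1) lo = a + 1 from by omega,
            PySem.List.pyRange_one_cons (by omega : a < min b (hi + 1)), List.flatMap_cons]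
      · rw [if_neg h, List.nil_append]
        by_cases hlo : a < lo
        · rw [show max a lo = lo from by omega, show max (a + 1) lo = lo from by omega]
        · rw [PySem.List.pyRange_one_eq_nil (by omega),
              PySem.List.pyRange_one_eq_nil (by omega)]

-- one year of B's filtered double loop is A's quarter run lo..hi of that year
lemma year_eq (g : String) (fy fq ty tq y : Int)
    (hfq1 : 1 ≤ fq) (hfq4 : fq ≤ 4) (htq1 : 1 ≤ tq) (htq4 : tq ≤ 4)
    (hy1 : fy ≤ y) (hy2 : y ≤ ty) :
    (PySem.List.pyRange 1 5 1).flatMap (fun q =>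
        if (fy < y ∨ (fy = y ∧ fq ≤ q)) ∧ (y < ty ∨ (y = ty ∧ q ≤ tq)) then qbody g y q else [])
      = innerQ g y (if y = fy then fq else 1) (if y = ty then tq else 4) := by
  have hcongr : ∀ q ∈ PySem.List.pyRange 1 5 1,
      (if (fy < y ∨ (fy = y ∧ fq ≤ q)) ∧ (y < ty ∨ (y = ty ∧ q ≤ tq)) then qbody g y q else [])
        = (if (if y = fy then fq else 1) ≤ q ∧ q ≤ (if y = ty then tq else 4) then qbody g y q else []) := by
    intro q hq
    have hq' := PySem.List.mem_pyRange_one.mp hq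
    have hiff : ((fy < y ∨ (fy = y ∧ fq ≤ q)) ∧ (y < ty ∨ (y = ty ∧ q ≤ tq))) ↔
        ((if y = fy then fq else 1) ≤ q ∧ q ≤ (if y = ty then tq else 4)) := by
      split_ifs with e1 e2 e3 <;> (constructor <;> intro h <;> omega)
    rw [if_congr hiff rfl rfl]
  rw [List.flatMap_congr hcongr,
      flatMap_if_range (qbody g y) _ _ 4 1 5 (by omega),
      show max 1 (if y = fy then fq else 1) = (if y = fy then fq else 1) from by
        split_ifs <;> omega,
      show min 5 ((if y = ty then tq else 4) + 1) = (if y = ty then tq else 4) + 1 from by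
        split_ifs <;> omega, innerQ]

-- peeling B's output into the first year and the remaining years (nonempty span)
lemma alt_eq_yearsFrom (fy fq ty tq : Int) (g : String)
    (hfq1 : 1 ≤ fq) (hfq4 : fq ≤ 4) (htq1 : 1 ≤ tq) (htq4 : tq ≤ 4)
    (hcond : fy < ty ∨ (fy = ty ∧ fq ≤ tq)) :
    generate_periods_alt fy fq ty tq g = yearsFrom ty tq g fy fq := by
  unfold generate_periods_alt yearsFrom
  rw [if_neg (by omega : ¬ (ty < fy ∨ (ty = fy ∧ tq < fq))),
      if_neg (by omega : ¬ ¬ (1 ≤ fq ∧ fq ≤ 4 ∧ 1 ≤ tq ∧ tq ≤ 4)),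
      PySem.List.pyRange_one_cons (by omega : fy < ty + 1), List.flatMap_cons]
  congr 1
  · have h := year_eq g fy fq ty tq fy hfq1 hfq4 htq1 htq4 (le_refl fy) (by omega)
    rw [if_pos rfl] at h
    exact h
  · apply List.flatMap_congr
    intro y' hy'
    have hy'' := PySem.List.mem_pyRange_one.mp hy'
    have h := year_eq g fy fq ty tq y' hfq1 hfq4 htq1 htq4 (by omega) (by omega)
    rw [if_neg (by omega : ¬ y' = fy)] at h
    exact h

-- ===== VERDICT (by name: the statement is the Claim_ definition above) =====
theorem generate_periods_spec : Claim_equal_generate_periods := by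
  intro fy fq ty tq g _ hpre
  unfold Spec_generate_periods
  by_cases hcond : fy < ty ∨ (fy = ty ∧ fq ≤ tq)
  · have hq : 1 ≤ fq ∧ fq ≤ 4 ∧ 1 ≤ tq ∧ tq ≤ 4 := by
      rcases hpre with h | h
      · exact h
      · exfalso; omega
    unfold generate_periods
    rw [loop_eq_years ty tq g hq.2.2.1 hq.2.2.2 _ fy fq hq.1 hq.2.1 (le_refl _) hcond,
        alt_eq_yearsFrom fy fq ty tq g hq.1 hq.2.1 hq.2.2.1 hq.2.2.2 hcond]
  · unfold generate_periods generate_periods_alt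
    rw [loop_exit ty tq g _ fy fq hcond, if_pos (by omega : ty < fy ∨ (ty = fy ∧ tq < fq))]
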